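-- pv_equiv track=rewrite | github.com/gemmechu/competitiveProgramming | CD9 Contest/Erasing Zeroes.py | eraseZero
-- ===== SOURCE A (Python) =====
-- def eraseZero(args:str):
--     count=0
--     isbegin=False
--     start=0
--     for i in range(len(args)):
--         if(args[i]=='1' and isbegin):
--
--             count+=(i-start-1)
--             isbegin=False
--         if(args[i]=='1'):
--             start=i
--             isbegin=True
--     return count
-- ===== SOURCE B (Python) =====
-- def eraseZero(args: str):
--     ones = [i for i, c in enumerate(args) if c == '1']
--     if not ones:
--         return 0
--     return ones[-1] - ones[0] + 1 - len(ones)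
-- ===== Notes on version B (the rewrite author's own statement) =====
-- stated objective: simpler
-- what changed: Replaces the stateful scan with flags (isbegin/start) and running gap sums by collecting the indices of '1's once and applying the closed-form telescoped formula last - first + 1 - number_of_ones.
import Mathlib
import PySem

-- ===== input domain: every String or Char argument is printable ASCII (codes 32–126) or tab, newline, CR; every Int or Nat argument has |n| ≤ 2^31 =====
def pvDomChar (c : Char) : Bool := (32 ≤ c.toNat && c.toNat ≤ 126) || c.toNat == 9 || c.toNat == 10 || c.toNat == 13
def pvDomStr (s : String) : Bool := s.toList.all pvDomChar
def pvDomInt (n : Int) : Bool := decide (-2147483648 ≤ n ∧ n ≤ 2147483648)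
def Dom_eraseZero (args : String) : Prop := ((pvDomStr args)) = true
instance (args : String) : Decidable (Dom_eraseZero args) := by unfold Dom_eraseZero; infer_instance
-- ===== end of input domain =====

-- B replaces A's stateful flag-and-gap scan by the closed-form telescoped formula
-- last - first + 1 - #ones over the collected indices of '1' (simpler; same cost).

-- ===== PORT A =====
-- one loop step of A: the two successive 'if's over state (count, isbegin, start)
def eraseZeroStep (s : Int × Bool × Int) (p : Int × Char) : Int × Bool × Int :=
  let s1 := if p.2 == '1' && s.2.1 then (s.1 + (p.1 - s.2.2 - 1), false, s.2.2) else s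
  if p.2 == '1' then (s1.1, true, p.1) else s1

def eraseZero (args : String) : Int :=
  ((PySem.List.enumerate args.toList).foldl eraseZeroStep (0, false, 0)).1

-- ===== PORT B =====
def eraseZero_alt (args : String) : Int :=
  let ones := ((PySem.List.enumerate args.toList).filter (fun p => p.2 == '1')).map (·.1)
  match ones with
  | [] => 0
  | h :: t => (h :: t).getLastD 0 - h + 1 - ((h :: t).length : Int)

-- ===== PRECONDITION & SPEC =====
def Spec_eraseZero (args : String) (out : Int) : Prop := out = eraseZero_alt args
instance (args : String) (out : Int) : Decidable (Spec_eraseZero args out) := by unfold Spec_eraseZero; infer_instance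

-- ===== CLAIM (what is proved, stated in full; the proofs are below) =====
def Claim_equal_eraseZero : Prop := ∀ (args : String), Dom_eraseZero args → Spec_eraseZero args (eraseZero args)

-- ===== LEMMAS AND PROOFS =====

-- the '1'-indices of a (index, char) list
def onesOf (l : List (Int × Char)) : List Int := (l.filter (fun p => p.2 == '1')).map (·.1)

-- invariant of A's whole loop, stated for an arbitrary pair list
theorem eraseZero_loop_inv (l : List (Int × Char)) :
    l.foldl eraseZeroStep (0, false, 0) =
      (match onesOf l with
       | [] => ((0 : Int), false, (0 : Int))
       | h :: t => ((h :: t).getLastD 0 - h + 1 - ((h :: t).length : Int), true,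
                    (h :: t).getLastD 0)) := by
  induction l using List.reverseRecOn with
  | nil => rfl
  | append_singleton l p ih =>
    rw [List.foldl_append, ih]
    have hones : onesOf (l ++ [p]) =
        onesOf l ++ (if p.2 == '1' then [p.1] else []) := by
      simp only [onesOf, List.filter_append, List.map_append]
      by_cases h : p.2 == '1' <;> simp [List.filter, h]
    by_cases h1 : p.2 == '1'
    · cases hO : onesOf l with
      | nil => simp [hones, hO, h1, eraseZeroStep, List.foldl]
      | cons h t =>
        simp only [hones, hO, h1, if_pos, List.foldl, eraseZeroStep]
        simp only [Bool.and_true, if_true]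
        show _ = ((h :: (t ++ [p.1])).getLastD 0 - h + 1 - ((h :: (t ++ [p.1])).length : Int),
          true, (h :: (t ++ [p.1])).getLastD 0)
        rw [show h :: (t ++ [p.1]) = (h :: t) ++ [p.1] from rfl, List.getLastD_concat]
        refine Prod.ext ?_ rfl
        push_cast [List.length_append, List.length_cons, List.length_nil]
        ring
    · cases hO : onesOf l with
      | nil => simp [hones, hO, h1, eraseZeroStep, List.foldl]
      | cons h t => simp [hones, hO, h1, eraseZeroStep, List.foldl]

-- ===== VERDICT (by name: the statement is the Claim_ definition above) =====
theorem eraseZero_spec : Claim_equal_eraseZero := by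
  intro args _
  unfold Spec_eraseZero eraseZero eraseZero_alt
  rw [eraseZero_loop_inv]
  have : onesOf (PySem.List.enumerate args.toList) =
      ((PySem.List.enumerate args.toList).filter (fun p => p.2 == '1')).map (·.1) := rfl
  rw [← this]
  cases onesOf (PySem.List.enumerate args.toList) <;> rfl
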